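-- pv_equiv track=rewrite | github.com/myLovetory/pythonptit | py01609.py | check
-- ===== SOURCE A (Python) =====
-- khoitao = ['2', '3', '5', '7']
--
-- def check(s) :
--     if s[-1] == '2' : return False
--     check = [0] * 4
--     for i in s :
--         for j in range(4) :
--             if i == khoitao[j] : check[j] = 1
--     if sum(check) == 4 : return True
--     return False
-- ===== SOURCE B (Python) =====
-- def check(s):
--     if s[-1] == '2':
--         return False
--     need = ['2', '3', '5', '7']
--     for ch in s:
--         if ch in need:
--             need.remove(ch)
--             if not need:
--                 return True
--     return False
-- ===== Notes on version B (the rewrite author's own statement) =====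
-- stated objective: alternative
-- what changed: Replaces A's scan that tests every character against all four targets and maintains a flags array summed at the end with a shrinking worklist of still-missing targets that is removed from as targets are found, returning early the moment the worklist empties.
import Mathlib
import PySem

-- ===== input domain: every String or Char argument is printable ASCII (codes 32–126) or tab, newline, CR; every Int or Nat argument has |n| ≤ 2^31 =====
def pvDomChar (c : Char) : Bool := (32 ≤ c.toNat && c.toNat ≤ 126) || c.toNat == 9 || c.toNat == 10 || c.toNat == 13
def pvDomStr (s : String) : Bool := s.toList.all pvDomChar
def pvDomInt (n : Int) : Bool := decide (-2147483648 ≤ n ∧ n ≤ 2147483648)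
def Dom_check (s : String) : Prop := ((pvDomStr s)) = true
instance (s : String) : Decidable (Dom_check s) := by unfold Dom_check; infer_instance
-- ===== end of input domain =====

-- B replaces A's flags-array-and-sum scan with a shrinking worklist of still-missing targets and an early return when it empties (objective: alternative).

-- ===== PORT A =====
def khoitao : List Char := ['2', '3', '5', '7']

def check (s : String) : Bool :=
  if PySem.Str.pyGet? s (-1) = some '2' then false
  else
    let ck : List Int :=
      s.toList.foldl (fun ck i =>
        (PySem.List.pyRange 0 4 1).foldl (fun ck j =>
          if some i = PySem.List.pyGet? khoitao j then PySem.List.pySetD ck j 1 else ck) ck)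
        [0, 0, 0, 0]
    if ck.sum = 4 then true else false

-- ===== PORT B =====
-- B's loop: walk the characters carrying the list of still-missing targets; remove a
-- target when seen, return True as soon as none are missing, False if the string ends.
def checkAltGo (need : List Char) (cs : List Char) : Bool :=
  match cs with
  | [] => false
  | ch :: rest =>
    if need.contains ch then
      let need2 := (PySem.List.remove? need ch).getD need
      if need2.isEmpty then true else checkAltGo need2 rest
    else checkAltGo need rest

def check_alt (s : String) : Bool :=
  if PySem.Str.pyGet? s (-1) = some '2' then false
  else checkAltGo ['2', '3', '5', '7'] s.toList

-- ===== PRECONDITION & SPEC =====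
-- Pre_ excludes only the empty string, on which A raises IndexError at s[-1] (B raises there too).
def Pre_check (s : String) : Prop := s ≠ ""
instance (s : String) : Decidable (Pre_check s) := by unfold Pre_check; infer_instance
def pvWitness_check : String := "2357"
def Spec_check (s : String) (out : Bool) : Prop := out = check_alt s
instance (s : String) (out : Bool) : Decidable (Spec_check s out) := by unfold Spec_check; infer_instance

-- ===== CLAIM (what is proved, stated in full; the proofs are below) =====
def Claim_equal_check : Prop := ∀ (s : String), Dom_check s → Pre_check s → Spec_check s (check s)

-- ===== LEMMAS AND PROOFS =====

-- one pass of A's inner loop on a concrete 4-flag accumulator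
set_option maxHeartbeats 1000000 in
lemma check_inner_step (i : Char) (a b c d : Int) :
    (PySem.List.pyRange 0 4 1).foldl (fun ck j =>
        if some i = PySem.List.pyGet? khoitao j then PySem.List.pySetD ck j 1 else ck) [a, b, c, d]
      = [if i = '2' then 1 else a, if i = '3' then 1 else b,
         if i = '5' then 1 else c, if i = '7' then 1 else d] := by
  have h : PySem.List.pyRange 0 4 1 = [0, 1, 2, 3] := by decide
  rw [h]
  have g0 : PySem.List.pyGet? khoitao 0 = some '2' := by decide
  have g1 : PySem.List.pyGet? khoitao 1 = some '3' := by decide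
  have g2 : PySem.List.pyGet? khoitao 2 = some '5' := by decide
  have g3 : PySem.List.pyGet? khoitao 3 = some '7' := by decide
  simp only [List.foldl, g0, g1, g2, g3]
  by_cases h2 : i = '2' <;> by_cases h3 : i = '3' <;> by_cases h5 : i = '5' <;> by_cases h7 : i = '7' <;>
    simp_all [PySem.List.pySetD, PySem.List.pySet?, PySem.List.pyIdx?]

-- how one processed character updates a single flag
lemma flag_step (i : Char) (rest : List Char) (c : Char) (a : Int) :
    (if c ∈ rest then (1 : Int) else if i = c then 1 else a) = if c ∈ i :: rest then 1 else a := by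
  by_cases hr : c ∈ rest <;> by_cases hi : i = c <;> simp_all [List.mem_cons, eq_comm]

-- A's outer loop sets each flag to 1 exactly when its character occurs
lemma check_loop (cs : List Char) (a b c d : Int) :
    cs.foldl (fun ck i =>
        (PySem.List.pyRange 0 4 1).foldl (fun ck j =>
          if some i = PySem.List.pyGet? khoitao j then PySem.List.pySetD ck j 1 else ck) ck) [a, b, c, d]
      = [if '2' ∈ cs then 1 else a, if '3' ∈ cs then 1 else b,
         if '5' ∈ cs then 1 else c, if '7' ∈ cs then 1 else d] := by
  induction cs generalizing a b c d with
  | nil => simp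
  | cons i rest ih =>
      rw [List.foldl_cons, check_inner_step, ih, flag_step, flag_step, flag_step, flag_step]

-- B's worklist loop: for a duplicate-free nonempty worklist, it returns true exactly
-- when every still-missing target occurs in the remaining characters
lemma checkAltGo_all (cs : List Char) (need : List Char)
    (hnd : need.Nodup) (hne : need ≠ []) :
    checkAltGo need cs = need.all (· ∈ cs) := by
  induction cs generalizing need with
  | nil =>
      cases need with
      | nil => exact absurd rfl hne
      | cons a t => simp [checkAltGo]
  | cons ch rest ih =>
      unfold checkAltGo
      by_cases hm : ch ∈ need
      · rw [if_pos (by simpa using hm), PySem.List.remove?_eq_some_erase _ _ hm]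
        simp only [Option.getD_some]
        by_cases he : need.erase ch = []
        · have : need = [ch] := by
            have hsub : need ⊆ [ch] := fun x hx => by
              rcases eq_or_ne x ch with rfl | hne'
              · simp
              · exact absurd ((List.mem_erase_of_ne hne').2 hx) (by simp [he])
            cases need with
            | nil => simp at hm
            | cons a t =>
                have ha : a = ch := by simpa using hsub (List.mem_cons_self ..)
                subst ha
                have ht : t = [] := by
                  cases t with
                  | nil => rfl
                  | cons b u =>
                      have hb : b = a := by simpa using hsub (by simp)
                      exact absurd (hb ▸ (by simp : b ∈ b :: u)) (by simp_all [List.nodup_cons] )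
                simp [ht]
          simp [this]
        · rw [if_neg (by simpa using he), ih _ (hnd.erase ch) he]
          rw [Bool.eq_iff_iff]; simp only [List.all_eq_true]
          constructor
          · intro h x hx
            rcases eq_or_ne x ch with rfl | hx'
            · simp
            · simpa [hx'] using h x ((List.mem_erase_of_ne hx').2 hx)
          · intro h x hx
            obtain ⟨hxch, hxm⟩ := (List.Nodup.mem_erase_iff hnd).1 hx
            simpa [hxch] using h x hxm
      · rw [if_neg (by simpa using hm), ih _ hnd hne]
        rw [Bool.eq_iff_iff]; simp only [List.all_eq_true]
        refine ⟨fun h x hx => ?_, fun h x hx => ?_⟩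
        · have hxch : x ≠ ch := fun e => hm (e ▸ hx)
          simp [hxch, by simpa [hxch] using h x hx]
        · have hxch : x ≠ ch := fun e => hm (e ▸ hx)
          simpa [hxch] using h x hx

-- ===== VERDICT (by name: the statement is the Claim_ definition above) =====
theorem check_spec : Claim_equal_check := by
  intro s _ _
  unfold Spec_check check check_alt
  by_cases hg : PySem.Str.pyGet? s (-1) = some '2'
  · rw [if_pos hg, if_pos hg]
  · rw [if_neg hg, if_neg hg]
    rw [check_loop, checkAltGo_all _ _ (by decide) (by decide)]
    by_cases q2 : '2' ∈ s.toList <;> by_cases q3 : '3' ∈ s.toList <;>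
      by_cases q5 : '5' ∈ s.toList <;> by_cases q7 : '7' ∈ s.toList <;>
      simp [q2, q3, q5, q7]
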